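-- pv_equiv track=rewrite | github.com/Georgi-Zahariev/ai-disaster-response | backend/services/fusion/signal_fusion_service.py | _get_modalities
-- ===== SOURCE A (Python) =====
-- from typing import List, Dict, Any, Set, Tuple, Optional
--
-- def _get_modalities(cluster: List[Dict[str, Any]]) -> Set[str]:
--     """
--     Identify which modalities contributed to cluster.
--
--     Based on observation ID prefixes: obs-txt-*, obs-vis-*, obs-qnt-*
--     """
--     modalities = set()
--     for obs in cluster:
--         obs_id = obs.get("observationId", "")
--         if obs_id.startswith("obs-txt-") or obs_id.startswith("obs-text-"):
--             modalities.add("text")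
--         elif obs_id.startswith("obs-vis-") or obs_id.startswith("obs-vision-"):
--             modalities.add("vision")
--         elif obs_id.startswith("obs-qnt-") or obs_id.startswith("obs-quant-"):
--             modalities.add("quantitative")
--     return modalities
-- ===== SOURCE B (Python) =====
-- _MODALITY_BY_TOKEN = {
--     "txt": "text", "text": "text",
--     "vis": "vision", "vision": "vision",
--     "qnt": "quantitative", "quant": "quantitative",
-- }
--
-- def _classify(obs_id):
--     """Parse the dash-delimited token after 'obs-' and look it up."""
--     if not obs_id.startswith("obs-"):
--         return None
--     rest = obs_id[4:]
--     cut = rest.find("-")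
--     if cut < 0:
--         return None
--     return _MODALITY_BY_TOKEN.get(rest[:cut])
--
-- def _get_modalities(cluster):
--     labels = [_classify(obs.get("observationId", "")) for obs in cluster]
--     return {m for m in labels if m is not None}
-- ===== Notes on version B (the rewrite author's own statement) =====
-- stated objective: alternative
-- what changed: Instead of testing six hardcoded prefixes per observation, B parses each id once (strip 'obs-', cut at the next dash) and looks the extracted token up in a token->modality dict, in a staged map-then-collect pipeline rather than A's single loop mutating a set.
import Mathlib
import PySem

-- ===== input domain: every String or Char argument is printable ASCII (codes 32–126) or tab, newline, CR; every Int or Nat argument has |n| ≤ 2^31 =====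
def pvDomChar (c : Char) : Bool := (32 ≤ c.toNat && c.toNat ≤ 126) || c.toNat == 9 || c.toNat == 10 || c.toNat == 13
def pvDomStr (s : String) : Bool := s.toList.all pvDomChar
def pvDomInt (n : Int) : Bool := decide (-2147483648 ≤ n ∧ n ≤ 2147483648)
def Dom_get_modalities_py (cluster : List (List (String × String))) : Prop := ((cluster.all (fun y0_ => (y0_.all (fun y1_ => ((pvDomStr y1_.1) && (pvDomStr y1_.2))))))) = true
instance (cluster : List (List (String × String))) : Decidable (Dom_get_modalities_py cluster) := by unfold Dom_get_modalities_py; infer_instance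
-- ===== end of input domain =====

-- B parses each observation id (strip "obs-", cut at the next dash, dict lookup of the token)
-- in a staged map-then-collect pipeline, instead of A's six-prefix if/elif cascade (alternative; same cost).

-- ===== PORT A =====
-- if/elif cascade over hardcoded prefixes, accumulating into a set
def get_modalities_py (cluster : List (List (String × String))) : List String :=
  cluster.foldl (fun modalities obs =>
    let obs_id := PySem.Dict.getD (PySem.Dict.mk obs) "observationId" ""
    if PySem.Str.startswith obs_id "obs-txt-" || PySem.Str.startswith obs_id "obs-text-" then
      PySem.Set.add modalities "text"
    else if PySem.Str.startswith obs_id "obs-vis-" || PySem.Str.startswith obs_id "obs-vision-" then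
      PySem.Set.add modalities "vision"
    else if PySem.Str.startswith obs_id "obs-qnt-" || PySem.Str.startswith obs_id "obs-quant-" then
      PySem.Set.add modalities "quantitative"
    else modalities) PySem.Set.empty

-- ===== PORT B =====
-- _MODALITY_BY_TOKEN
def tokenMap : PySem.Dict String String :=
  PySem.Dict.mk [("txt", "text"), ("text", "text"),
                 ("vis", "vision"), ("vision", "vision"),
                 ("qnt", "quantitative"), ("quant", "quantitative")]

-- _classify: strip "obs-", cut the rest at the first "-", look the token up
def classify (obs_id : String) : Option String :=
  if !PySem.Str.startswith obs_id "obs-" then none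
  else
    let rest := PySem.Str.slice obs_id (some 4) none
    let cut := PySem.Str.find rest "-"
    if cut < 0 then none
    else PySem.Dict.get? tokenMap (PySem.Str.slice rest none (some cut))

-- stage 1: classify every observation; stage 2: set-comprehension over the non-None labels
def get_modalities_py_alt (cluster : List (List (String × String))) : List String :=
  let labels := cluster.map (fun obs =>
    classify (PySem.Dict.getD (PySem.Dict.mk obs) "observationId" ""))
  PySem.Set.ofList (labels.filterMap (fun m => m))

-- ===== PRECONDITION & SPEC =====
def Spec_get_modalities_py (cluster : List (List (String × String))) (out : List String) : Prop := out = get_modalities_py_alt cluster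
instance (cluster : List (List (String × String))) (out : List String) : Decidable (Spec_get_modalities_py cluster out) := by unfold Spec_get_modalities_py; infer_instance

-- ===== CLAIM (what is proved, stated in full; the proofs are below) =====
def Claim_equal_get_modalities_py : Prop := ∀ (cluster : List (List (String × String))), Dom_get_modalities_py cluster → Spec_get_modalities_py cluster (get_modalities_py cluster)

-- ===== LEMMAS AND PROOFS =====

theorem find_go_pre (pre post : List Char) (k : Nat) (h : '-' ∉ pre) :
    PySem.Chars.find.go ['-'] (pre ++ '-' :: post) k = (k + pre.length : Int) := by
  induction pre generalizing k with
  | nil => simp [PySem.Chars.find.go, List.isPrefixOf]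
  | cons a t ih =>
      have ha : ('-' == a) = false := by
        simp; rintro rfl; exact h (by simp)
      simp only [List.cons_append, PySem.Chars.find.go, List.isPrefixOf, ha, Bool.false_and,
        if_neg Bool.false_ne_true]
      rw [ih (k+1) (fun hm => h (List.mem_cons_of_mem _ hm))]
      simp [List.length_cons]; ring

theorem find_go_nonneg (cs : List Char) (k : Nat) (hr : 0 ≤ PySem.Chars.find.go ['-'] cs k) :
    ∃ pre post, cs = pre ++ '-' :: post ∧
      PySem.Chars.find.go ['-'] cs k = (k + pre.length : Int) ∧ '-' ∉ pre := by
  induction cs generalizing k with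
  | nil => simp [PySem.Chars.find.go, List.isEmpty] at hr
  | cons a t ih =>
      by_cases ha : ('-' == a) = true
      · have : a = '-' := (beq_iff_eq.mp ha).symm
        subst this
        exact ⟨[], t, by simp, by simp [PySem.Chars.find.go, List.isPrefixOf], by simp⟩
      · have ha' : ('-' == a) = false := by simpa using ha
        have hstep : PySem.Chars.find.go ['-'] (a :: t) k = PySem.Chars.find.go ['-'] t (k+1) := by
          simp [PySem.Chars.find.go, List.isPrefixOf, ha']
        rw [hstep] at hr ⊢
        obtain ⟨pre, post, hdec, hval, hnd⟩ := ih (k+1) hr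
        refine ⟨a :: pre, post, by simp [hdec], by rw [hval]; simp [List.length_cons]; ring, ?_⟩
        intro hm
        rcases List.mem_cons.mp hm with h1 | h2
        · exact ha (beq_iff_eq.mpr h1)
        · exact hnd h2


theorem classify_eq_some (s : String) (tok tail : List Char) (m : String)
    (hnd : '-' ∉ tok)
    (hmap : PySem.Dict.get? tokenMap (String.ofList tok) = some m)
    (hs : s.toList = "obs-".toList ++ (tok ++ '-' :: tail)) :
    classify s = some m := by
  have hsw : PySem.Str.startswith s "obs-" = true := by
    show "obs-".toList.isPrefixOf s.toList = true
    rw [hs]; exact List.isPrefixOf_iff_prefix.mpr ⟨_, rfl⟩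
  have hrest : (PySem.Str.slice s (some 4) none).toList = tok ++ '-' :: tail := by
    simp only [PySem.Str.slice, PySem.Chars.slice, String.toList_ofList]
    rw [hs, PySem.List.slice_from _ (by norm_num : (0:Int) ≤ 4)]
    simp
  have hcut : PySem.Str.find (PySem.Str.slice s (some 4) none) "-" = (tok.length : Int) := by
    show PySem.Chars.find.go "-".toList (PySem.Str.slice s (some 4) none).toList 0 = _
    rw [hrest]
    simpa using find_go_pre tok tail 0 hnd
  have hkey : PySem.Str.slice (PySem.Str.slice s (some 4) none) none (some (tok.length : Int)) = String.ofList tok := by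
    apply String.toList_inj.mp
    have hb : (PySem.Str.slice (PySem.Str.slice s (some 4) none) none (some (tok.length : Int))).toList
        = PySem.List.slice (PySem.Str.slice s (some 4) none).toList none (some (tok.length : Int)) := by
      simp [PySem.Str.slice, PySem.Chars.slice]
    rw [hb, hrest, PySem.List.slice_to _ (by positivity)]
    simp [List.take_left']
  simp only [classify, hsw, Bool.not_true, if_neg Bool.false_ne_true, hcut]
  rw [if_neg (by omega), hkey, hmap]

theorem tokenMap_get?_cases (k m : String) (h : PySem.Dict.get? tokenMap k = some m) :
    k = "txt" ∨ k = "text" ∨ k = "vis" ∨ k = "vision" ∨ k = "qnt" ∨ k = "quant" := by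
  simp only [tokenMap, PySem.Dict.get?, PySem.Dict.mk, Option.map_eq_some_iff] at h
  obtain ⟨⟨kk, vv⟩, hf, _⟩ := h
  have hk : kk = k := beq_iff_eq.mp (List.find?_eq_some_iff_append.mp hf).1
  have hmem := List.mem_of_find?_eq_some hf
  subst hk
  simp only [List.mem_cons, List.not_mem_nil, or_false, Prod.mk.injEq] at hmem
  rcases hmem with ⟨hk, _⟩ | ⟨hk, _⟩ | ⟨hk, _⟩ | ⟨hk, _⟩ | ⟨hk, _⟩ | ⟨hk, _⟩ <;> simp [← hk]

theorem classify_eq_none (s : String)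
    (h1 : PySem.Str.startswith s "obs-txt-" = false)
    (h2 : PySem.Str.startswith s "obs-text-" = false)
    (h3 : PySem.Str.startswith s "obs-vis-" = false)
    (h4 : PySem.Str.startswith s "obs-vision-" = false)
    (h5 : PySem.Str.startswith s "obs-qnt-" = false)
    (h6 : PySem.Str.startswith s "obs-quant-" = false) :
    classify s = none := by
  unfold classify
  cases hsw : PySem.Str.startswith s "obs-" with
  | false => simp
  | true =>
    simp only [Bool.not_true, if_neg Bool.false_ne_true]
    have hpre : s.toList = "obs-".toList ++ (PySem.Str.slice s (some 4) none).toList := by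
      have := List.isPrefixOf_iff_prefix.mp hsw
      obtain ⟨t, ht⟩ := this
      simp only [PySem.Str.slice, PySem.Chars.slice, String.toList_ofList]
      rw [← ht, PySem.List.slice_from _ (by norm_num : (0:Int) ≤ 4)]
      simp
    set rest := PySem.Str.slice s (some 4) none with hrdef
    by_cases hneg : PySem.Str.find rest "-" < 0
    · rw [if_pos hneg]
    · rw [if_neg hneg]
      push_neg at hneg
      obtain ⟨pre, post, hdec, hval, hnd⟩ := find_go_nonneg rest.toList 0 (by simpa using hneg)
      cases hget : PySem.Dict.get? tokenMap (PySem.Str.slice rest none (some (PySem.Str.find rest "-"))) with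
      | none => rfl
      | some m =>
        exfalso
        have hkeyl : (PySem.Str.slice rest none (some (PySem.Str.find rest "-"))).toList = pre := by
          have hb : (PySem.Str.slice rest none (some (PySem.Str.find rest "-"))).toList
              = PySem.List.slice rest.toList none (some (PySem.Str.find rest "-")) := by
            simp [PySem.Str.slice, PySem.Chars.slice]
          rw [hb, PySem.List.slice_to _ hneg]
          have hfind : PySem.Str.find rest "-" = (pre.length : Int) := by
            show PySem.Chars.find.go "-".toList rest.toList 0 = _
            simpa using hval
          rw [hfind, hdec]
          simp [List.take_left']
        have hkeys := tokenMap_get?_cases _ _ hget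
        have hsl : s.toList = "obs-".toList ++ (pre ++ '-' :: post) := by rw [hpre, hdec]
        -- each token case contradicts the corresponding hi
        have hpreL : ∀ (p : String), s.toList = p.toList ++ post → PySem.Str.startswith s p = true := by
          intro p h
          show p.toList.isPrefixOf s.toList = true
          rw [h]; exact List.isPrefixOf_iff_prefix.mpr ⟨_, rfl⟩
        rcases hkeys with hk | hk | hk | hk | hk | hk <;> rw [hk] at hkeyl <;>
          [exact absurd (hpreL "obs-txt-" (by rw [hsl, ← hkeyl]; simp)) (by rw [h1]; simp);
           exact absurd (hpreL "obs-text-" (by rw [hsl, ← hkeyl]; simp)) (by rw [h2]; simp);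
           exact absurd (hpreL "obs-vis-" (by rw [hsl, ← hkeyl]; simp)) (by rw [h3]; simp);
           exact absurd (hpreL "obs-vision-" (by rw [hsl, ← hkeyl]; simp)) (by rw [h4]; simp);
           exact absurd (hpreL "obs-qnt-" (by rw [hsl, ← hkeyl]; simp)) (by rw [h5]; simp);
           exact absurd (hpreL "obs-quant-" (by rw [hsl, ← hkeyl]; simp)) (by rw [h6]; simp)]

-- the A-side cascade computes exactly `classify` per observation id
theorem step_classify (acc : List String) (s : String) :
    (if PySem.Str.startswith s "obs-txt-" || PySem.Str.startswith s "obs-text-" then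
       PySem.Set.add acc "text"
     else if PySem.Str.startswith s "obs-vis-" || PySem.Str.startswith s "obs-vision-" then
       PySem.Set.add acc "vision"
     else if PySem.Str.startswith s "obs-qnt-" || PySem.Str.startswith s "obs-quant-" then
       PySem.Set.add acc "quantitative"
     else acc)
    = (match classify s with
       | some m => PySem.Set.add acc m
       | none => acc) := by
  have decomp : ∀ (p : String), PySem.Str.startswith s p = true →
      ∃ t, s.toList = p.toList ++ t := by
    intro p hp
    obtain ⟨t, ht⟩ := List.isPrefixOf_iff_prefix.mp hp
    exact ⟨t, ht.symm⟩
  by_cases c1 : (PySem.Str.startswith s "obs-txt-" || PySem.Str.startswith s "obs-text-") = true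
  · rw [if_pos c1]
    rcases Bool.or_eq_true_iff.mp c1 with h | h
    · obtain ⟨t, ht⟩ := decomp _ h
      rw [classify_eq_some s "txt".toList t "text" (by decide) (by decide) (by rw [ht]; simp)]
    · obtain ⟨t, ht⟩ := decomp _ h
      rw [classify_eq_some s "text".toList t "text" (by decide) (by decide) (by rw [ht]; simp)]
  · have c1f : PySem.Str.startswith s "obs-txt-" = false ∧ PySem.Str.startswith s "obs-text-" = false :=
      Bool.or_eq_false_iff.mp (by simpa using c1)
    rw [if_neg c1]
    by_cases c2 : (PySem.Str.startswith s "obs-vis-" || PySem.Str.startswith s "obs-vision-") = true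
    · rw [if_pos c2]
      rcases Bool.or_eq_true_iff.mp c2 with h | h
      · obtain ⟨t, ht⟩ := decomp _ h
        rw [classify_eq_some s "vis".toList t "vision" (by decide) (by decide) (by rw [ht]; simp)]
      · obtain ⟨t, ht⟩ := decomp _ h
        rw [classify_eq_some s "vision".toList t "vision" (by decide) (by decide) (by rw [ht]; simp)]
    · have c2f : PySem.Str.startswith s "obs-vis-" = false ∧ PySem.Str.startswith s "obs-vision-" = false :=
        Bool.or_eq_false_iff.mp (by simpa using c2)
      rw [if_neg c2]
      by_cases c3 : (PySem.Str.startswith s "obs-qnt-" || PySem.Str.startswith s "obs-quant-") = true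
      · rw [if_pos c3]
        rcases Bool.or_eq_true_iff.mp c3 with h | h
        · obtain ⟨t, ht⟩ := decomp _ h
          rw [classify_eq_some s "qnt".toList t "quantitative" (by decide) (by decide) (by rw [ht]; simp)]
        · obtain ⟨t, ht⟩ := decomp _ h
          rw [classify_eq_some s "quant".toList t "quantitative" (by decide) (by decide) (by rw [ht]; simp)]
      · have c3f : PySem.Str.startswith s "obs-qnt-" = false ∧ PySem.Str.startswith s "obs-quant-" = false :=
          Bool.or_eq_false_iff.mp (by simpa using c3)
        rw [if_neg c3]
        rw [classify_eq_none s c1f.1 c1f.2 c2f.1 c2f.2 c3f.1 c3f.2]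

-- a fold of the cascade is the fold of Set.add over the classified, filtered labels
theorem fold_filterMap (cluster : List (List (String × String))) (acc : List String) :
    ((cluster.map (fun obs =>
        classify (PySem.Dict.getD (PySem.Dict.mk obs) "observationId" ""))).filterMap
      (fun m => m)).foldl PySem.Set.add acc
    = cluster.foldl (fun modalities obs =>
        let obs_id := PySem.Dict.getD (PySem.Dict.mk obs) "observationId" ""
        if PySem.Str.startswith obs_id "obs-txt-" || PySem.Str.startswith obs_id "obs-text-" then
          PySem.Set.add modalities "text"
        else if PySem.Str.startswith obs_id "obs-vis-" || PySem.Str.startswith obs_id "obs-vision-" then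
          PySem.Set.add modalities "vision"
        else if PySem.Str.startswith obs_id "obs-qnt-" || PySem.Str.startswith obs_id "obs-quant-" then
          PySem.Set.add modalities "quantitative"
        else modalities) acc := by
  induction cluster generalizing acc with
  | nil => rfl
  | cons obs rest ih =>
      simp only [List.map_cons, List.foldl_cons]
      rw [step_classify acc (PySem.Dict.getD (PySem.Dict.mk obs) "observationId" "")]
      cases classify (PySem.Dict.getD (PySem.Dict.mk obs) "observationId" "") with
      | none => simpa [List.filterMap_cons] using ih acc
      | some m => simpa [List.filterMap_cons] using ih (PySem.Set.add acc m)

-- ===== VERDICT (by name: the statement is the Claim_ definition above) =====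
theorem get_modalities_py_spec : Claim_equal_get_modalities_py := by
  intro cluster _
  unfold Spec_get_modalities_py get_modalities_py get_modalities_py_alt
  rw [PySem.Set.ofList_eq_foldl]
  exact (fold_filterMap cluster PySem.Set.empty).symm
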